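-- pv_equiv track=rewrite | github.com/pypi-data/pypi-mirror-402 | packages/runbooks/runbooks-1.2.6-py3-none-any.whl/runbooks/finops/helpers.py | _truncate_service_costs
-- ===== SOURCE A (Python) =====
-- def _truncate_service_costs(services_data: str, max_length: int = 500) -> str:
--     """
--     Truncate service costs data for PDF display if too long.
--
--     :param services_data: Service costs formatted as string
--     :param max_length: Maximum character length before truncation
--     :return: Truncated service costs string
--     """
--     if len(services_data) <= max_length:
--         return services_data
--
--     lines = services_data.split("\n")
--     truncated_lines = []
--     current_length = 0
--
--     for line in lines:
--         if current_length + len(line) + 1 <= max_length - 50:  # Reserve space for truncation message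
--             truncated_lines.append(line)
--             current_length += len(line) + 1
--         else:
--             break
--
--     # Add truncation indicator with service count
--     remaining_services = len(lines) - len(truncated_lines)
--     if remaining_services > 0:
--         truncated_lines.append(f"... and {remaining_services} more services")
--
--     return "\n".join(truncated_lines)
-- ===== SOURCE B (Python) =====
-- def _truncate_service_costs(services_data: str, max_length: int = 500) -> str:
--     if len(services_data) <= max_length:
--         return services_data
--
--     lines = services_data.split("\n")
--     limit = max_length - 50  # Reserve space for truncation message
--
--     # Prefix sums of (len(line) + 1); monotonically increasing since each term >= 1.
--     prefixes = []
--     total = 0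
--     for line in lines:
--         total += len(line) + 1
--         prefixes.append(total)
--
--     k = sum(1 for p in prefixes if p <= limit)
--     truncated_lines = lines[:k]
--
--     remaining = len(lines) - k
--     if remaining > 0:
--         truncated_lines.append(f"... and {remaining} more services")
--
--     return "\n".join(truncated_lines)
-- ===== Notes on version B (the rewrite author's own statement) =====
-- stated objective: alternative
-- what changed: Replaces the greedy append-and-break accumulator loop by precomputed prefix sums of (len(line)+1): the kept count k is the number of prefixes within max_length-50 (valid because prefix sums are strictly increasing), truncation is a slice lines[:k], and the remainder count comes from k rather than from the built list.
import Mathlib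
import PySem

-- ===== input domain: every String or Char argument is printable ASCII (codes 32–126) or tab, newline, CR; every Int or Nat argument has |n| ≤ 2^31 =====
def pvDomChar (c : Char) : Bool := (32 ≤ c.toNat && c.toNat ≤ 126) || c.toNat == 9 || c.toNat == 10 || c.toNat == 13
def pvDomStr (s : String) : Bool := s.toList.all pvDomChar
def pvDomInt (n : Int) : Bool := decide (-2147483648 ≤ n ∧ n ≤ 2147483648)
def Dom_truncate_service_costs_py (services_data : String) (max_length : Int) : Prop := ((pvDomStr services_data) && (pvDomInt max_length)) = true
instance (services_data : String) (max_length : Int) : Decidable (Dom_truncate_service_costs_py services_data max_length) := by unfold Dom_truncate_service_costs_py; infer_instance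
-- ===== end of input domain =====

-- B replaces A's greedy append-and-break loop by prefix sums + count + slice; alternative decomposition, same cost.

-- ===== PORT A =====
-- A's for-loop with break: accumulate lines while current_length + len(line) + 1 <= lim.
def pvLoopA (lim : Int) : List (List Char) → Int → List (List Char)
  | [], _ => []
  | l :: rest, cur =>
    if cur + (l.length : Int) + 1 ≤ lim then
      l :: pvLoopA lim rest (cur + (l.length : Int) + 1)
    else []

def truncate_service_costs_py (services_data : String) (max_length : Int) : String :=
  if (PySem.Str.len services_data : Int) ≤ max_length then services_data
  else
    let lines := PySem.Chars.splitOn services_data.toList ['\n']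
    let truncated_lines := pvLoopA (max_length - 50) lines 0
    let remaining : Int := (lines.length : Int) - (truncated_lines.length : Int)
    let final := if remaining > 0 then
        truncated_lines ++ ["... and ".toList ++ PySem.Int.toChars remaining ++ " more services".toList]
      else truncated_lines
    String.ofList (PySem.Chars.join ['\n'] final)

-- ===== PORT B =====
-- Source B's prefix-sum loop: running totals of len(line)+1.
def pvPrefix (t : Int) : List (List Char) → List Int
  | [] => []
  | l :: rest => (t + (l.length : Int) + 1) :: pvPrefix (t + (l.length : Int) + 1) rest

def truncate_service_costs_py_alt (services_data : String) (max_length : Int) : String :=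
  if (PySem.Str.len services_data : Int) ≤ max_length then services_data
  else
    let lines := PySem.Chars.splitOn services_data.toList ['\n']
    let limit := max_length - 50
    let prefixes := pvPrefix 0 lines
    let k := prefixes.countP (fun p => decide (p ≤ limit))
    let truncated_lines := lines.take k
    let remaining : Int := (lines.length : Int) - (k : Int)
    if remaining > 0 then
      String.ofList (PySem.Chars.join ['\n'] (truncated_lines ++ ["... and ".toList ++ PySem.Int.toChars remaining ++ " more services".toList]))
    else
      String.ofList (PySem.Chars.join ['\n'] truncated_lines)

-- ===== PRECONDITION & SPEC =====
def Spec_truncate_service_costs_py (services_data : String) (max_length : Int) (out : String) : Prop := out = truncate_service_costs_py_alt services_data max_length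
instance (services_data : String) (max_length : Int) (out : String) : Decidable (Spec_truncate_service_costs_py services_data max_length out) := by unfold Spec_truncate_service_costs_py; infer_instance

-- ===== CLAIM (what is proved, stated in full; the proofs are below) =====
def Claim_equal_truncate_service_costs_py : Prop := ∀ (services_data : String) (max_length : Int), Dom_truncate_service_costs_py services_data max_length → Spec_truncate_service_costs_py services_data max_length (truncate_service_costs_py services_data max_length)

-- ===== LEMMAS AND PROOFS =====

theorem pvPrefix_ge (xs : List (List Char)) (t : Int) : ∀ p ∈ pvPrefix t xs, t ≤ p := by
  induction xs generalizing t with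
  | nil => simp [pvPrefix]
  | cons l rest ih =>
    intro p hp
    simp only [pvPrefix, List.mem_cons] at hp
    rcases hp with h | h
    · have : (0 : Int) ≤ (l.length : Int) := Int.natCast_nonneg _
      omega
    · have h1 : (0 : Int) ≤ (l.length : Int) := Int.natCast_nonneg _
      have h2 := ih (t + (l.length : Int) + 1) p h
      omega

theorem pvPrefix_length (xs : List (List Char)) (t : Int) : (pvPrefix t xs).length = xs.length := by
  induction xs generalizing t with
  | nil => rfl
  | cons l rest ih => simp [pvPrefix, ih]

-- A's greedy break equals taking the count of prefix sums within the limit.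
theorem pvLoopA_eq_take (lim : Int) (xs : List (List Char)) (cur : Int) :
    pvLoopA lim xs cur = xs.take ((pvPrefix cur xs).countP (fun p => decide (p ≤ lim))) := by
  induction xs generalizing cur with
  | nil => rfl
  | cons l rest ih =>
    simp only [pvLoopA, pvPrefix, List.countP_cons]
    by_cases h : cur + (l.length : Int) + 1 ≤ lim
    · rw [if_pos h, ih]
      have h' : cur + (l.length : Int) < lim := by omega
      simp [h']
    · have hz : (pvPrefix (cur + (l.length : Int) + 1) rest).countP
          (fun p => decide (p ≤ lim)) = 0 := by
        rw [List.countP_eq_zero]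
        intro p hp
        have := pvPrefix_ge rest (cur + (l.length : Int) + 1) p hp
        simp only [decide_eq_true_eq]
        omega
      simp [h, hz]

theorem pvTake_length (lim : Int) (xs : List (List Char)) :
    (xs.take ((pvPrefix 0 xs).countP (fun p => decide (p ≤ lim)))).length
      = (pvPrefix 0 xs).countP (fun p => decide (p ≤ lim)) := by
  have : (pvPrefix 0 xs).countP (fun p => decide (p ≤ lim)) ≤ xs.length := by
    rw [← pvPrefix_length xs 0]
    exact List.countP_le_length
  simp [List.length_take, Nat.min_eq_left this]

-- ===== VERDICT (by name: the statement is the Claim_ definition above) =====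
theorem truncate_service_costs_py_spec : Claim_equal_truncate_service_costs_py := by
  intro services_data max_length _
  unfold Spec_truncate_service_costs_py truncate_service_costs_py truncate_service_costs_py_alt
  by_cases hg : PySem.Str.len services_data ≤ max_length
  · rw [if_pos hg, if_pos hg]
  · rw [if_neg hg, if_neg hg]
    simp only [pvLoopA_eq_take, pvTake_length]
    split <;> rfl
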